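-- pv_equiv track=rewrite | github.com/Art-Fakt/Subrec0n | utilities/MiscHelpers.py | uniqueSubdomainLevels
-- ===== SOURCE A (Python) =====
-- def uniqueSubdomainLevels(subdomains):
-- 	unique_subs = set()
-- 	unique_subs.add("")
--
-- 	for subdomain in subdomains:
-- 		subdomain_parts = subdomain[0].split(".")
--
-- 		for i in range(len(subdomain_parts) - 1):
-- 			unique_subs.add(".".join(sub for sub in subdomain[0].split(".")[i + 1:]))
--
-- 	return list(unique_subs)
-- ===== SOURCE B (Python) =====
-- def uniqueSubdomainLevels(subdomains):
-- 	unique_subs = {""}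
--
-- 	for subdomain in subdomains:
-- 		s = subdomain[0]
-- 		while True:
-- 			i = s.find(".")
-- 			if i == -1:
-- 				break
-- 			s = s[i + 1:]
-- 			unique_subs.add(s)
--
-- 	return list(unique_subs)
-- ===== Notes on version B (the rewrite author's own statement) =====
-- stated objective: simpler
-- what changed: Instead of splitting each name into a parts list and, for every index i, re-splitting the string, slicing parts[i+1:] and re-joining them with '.', B peels the leftmost label off the string in place (s = s[s.find('.')+1:]) and adds each shrinking tail directly, never building or joining a parts list.
import Mathlib
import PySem

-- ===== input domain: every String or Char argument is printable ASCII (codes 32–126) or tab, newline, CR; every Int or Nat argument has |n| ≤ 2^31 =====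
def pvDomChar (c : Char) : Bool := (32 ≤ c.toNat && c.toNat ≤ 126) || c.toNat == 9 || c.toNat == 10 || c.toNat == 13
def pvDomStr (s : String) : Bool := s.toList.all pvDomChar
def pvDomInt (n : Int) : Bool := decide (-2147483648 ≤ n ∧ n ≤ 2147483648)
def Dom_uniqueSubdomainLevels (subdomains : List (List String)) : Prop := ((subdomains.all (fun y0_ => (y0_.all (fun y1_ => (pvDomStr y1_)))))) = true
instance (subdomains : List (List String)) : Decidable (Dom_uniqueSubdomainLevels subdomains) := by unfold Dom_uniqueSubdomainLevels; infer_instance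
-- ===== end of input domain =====

-- B peels the leftmost label off each name in place (s = s[s.find('.')+1:]) and adds the shrinking
-- tails directly, instead of A's split-into-parts list with a re-split + slice + '.'-join per level
-- (objective: simpler; same return value on every input where A returns).

-- ===== PORT A =====
def uniqueSubdomainLevels (subdomains : List (List String)) : List String :=
  -- unique_subs = set(); unique_subs.add("")
  let uniqueSubs0 : PySem.Set String := PySem.Set.add PySem.Set.empty ""
  subdomains.foldl (fun uniqueSubs subdomain =>
    -- subdomain_parts = subdomain[0].split(".")   (subdomain[0] total via getD; Pre_ excludes the IndexError input)
    let subdomainParts := (PySem.Str.split? ((PySem.List.pyGet? subdomain 0).getD "") ".").getD []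
    -- for i in range(len(subdomain_parts) - 1): unique_subs.add(".".join(subdomain[0].split(".")[i+1:]))
    (PySem.List.pyRange 0 ((subdomainParts.length : Int) - 1) 1).foldl
      (fun uniqueSubs i =>
        PySem.Set.add uniqueSubs
          (PySem.Str.join "."
            (PySem.List.slice ((PySem.Str.split? ((PySem.List.pyGet? subdomain 0).getD "") ".").getD [])
              (some (i + 1)) none)))
      uniqueSubs) uniqueSubs0

-- ===== PORT B =====
-- the 'while True: i = s.find("."); if i == -1: break; s = s[i+1:]; unique_subs.add(s)' loop of Source B
def pvPeelB (uniqueSubs : PySem.Set String) (s : String) : PySem.Set String :=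
  if PySem.Str.find s "." = -1 then uniqueSubs
  else
    pvPeelB
      (PySem.Set.add uniqueSubs (PySem.Str.slice s (some (PySem.Str.find s "." + 1)) none))
      (PySem.Str.slice s (some (PySem.Str.find s "." + 1)) none)
termination_by s.toList.length
decreasing_by
  rename_i h
  have h0 : (0:Int) ≤ PySem.Str.find s "." := by
    have := PySem.Chars.neg_one_le_find s.toList ".".toList
    simp only [PySem.Str.find] at h ⊢
    omega
  have hne : s.toList ≠ [] := by
    intro hnil
    apply h
    simp only [PySem.Str.find, hnil]
    rw [PySem.Chars.find_eq_neg_one_iff]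
    intro hinf
    have := hinf.sublist.length_le
    simp at this
  have := PySem.Str.toList_slice s (some (PySem.Str.find s "." + 1)) none
  rw [this, PySem.Chars.slice_eq_listSlice, PySem.List.slice_from _ (by omega)]
  have hpos : 0 < s.toList.length := List.length_pos_iff.mpr hne
  simp only [List.length_drop]
  omega

def uniqueSubdomainLevels_alt (subdomains : List (List String)) : List String :=
  -- unique_subs = {""}
  subdomains.foldl
    (fun uniqueSubs subdomain =>
      -- s = subdomain[0]; then the peel loop
      pvPeelB uniqueSubs ((PySem.List.pyGet? subdomain 0).getD ""))
    (PySem.Set.ofList [""])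

-- ===== PRECONDITION & SPEC =====
-- Pre_ excludes only inputs on which Python A raises IndexError (an empty inner list: subdomain[0]).
def Pre_uniqueSubdomainLevels (subdomains : List (List String)) : Prop :=
  ∀ subdomain ∈ subdomains, subdomain ≠ []
instance (subdomains : List (List String)) : Decidable (Pre_uniqueSubdomainLevels subdomains) := by
  unfold Pre_uniqueSubdomainLevels; infer_instance

def pvWitness_uniqueSubdomainLevels : List (List String) := [["mail.server.example.com"], ["example.com"]]

def Spec_uniqueSubdomainLevels (subdomains : List (List String)) (out : List String) : Prop :=
  out = uniqueSubdomainLevels_alt subdomains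
instance (subdomains : List (List String)) (out : List String) : Decidable (Spec_uniqueSubdomainLevels subdomains out) := by
  unfold Spec_uniqueSubdomainLevels; infer_instance

-- ===== CLAIM (what is proved, stated in full; the proofs are below) =====
def Claim_equal_uniqueSubdomainLevels : Prop := ∀ (subdomains : List (List String)), Dom_uniqueSubdomainLevels subdomains → Pre_uniqueSubdomainLevels subdomains → Spec_uniqueSubdomainLevels subdomains (uniqueSubdomainLevels subdomains)

-- ===== LEMMAS AND PROOFS =====

-- Reference form of CPython's str.split('.'): peel characters, cutting at each '.'.
def pvGoSpec (pre : List Char) : List Char → List (List Char)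
  | [] => [pre]
  | c :: rest => if c = '.' then pre :: pvGoSpec [] rest else pvGoSpec (pre ++ [c]) rest

theorem pvGo_eq (fuel : Nat) : ∀ (l cur : List Char) (acc : List (List Char)), l.length < fuel →
    PySem.Chars.splitOn.go ['.'] fuel l cur acc = acc.reverse ++ pvGoSpec cur.reverse l := by
  induction fuel with
  | zero => intro l cur acc h; omega
  | succ f ih =>
    intro l cur acc h
    cases l with
    | nil => simp [PySem.Chars.splitOn.go, pvGoSpec]
    | cons c rest =>
      rw [PySem.Chars.splitOn.go]
      by_cases hc : c = '.'
      · subst hc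
        rw [if_pos (show List.isPrefixOf ['.'] ('.' :: rest) = true by simp [List.isPrefixOf])]
        rw [show List.drop ['.'].length ('.' :: rest) = rest from rfl]
        rw [ih rest [] _ (by simp at h ⊢; omega)]
        simp [pvGoSpec]
      · rw [if_neg (show ¬ List.isPrefixOf ['.'] (c :: rest) = true by
          simp [List.isPrefixOf]; exact fun h' => hc h'.symm)]
        rw [ih rest (c :: cur) acc (by simp at h ⊢; omega)]
        simp [pvGoSpec, hc]

theorem pvSplitOn_eq (cs : List Char) : PySem.Chars.splitOn cs ['.'] = pvGoSpec [] cs := by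
  have := pvGo_eq (cs.length + 1) cs [] [] (by omega)
  simpa [PySem.Chars.splitOn] using this

-- subdomain[0].split(".") in terms of pvGoSpec
theorem pvSplit_eq (s : String) :
    (PySem.Str.split? s ".").getD [] = (pvGoSpec [] s.toList).map String.ofList := by
  simp only [PySem.Str.split?, PySem.Chars.split?]
  rw [if_neg (by decide)]
  rw [show (".".toList : List Char) = ['.'] from rfl, pvSplitOn_eq]
  rfl

theorem pvGoSpec_ne_nil (cs pre : List Char) : pvGoSpec pre cs ≠ [] := by
  induction cs generalizing pre with
  | nil => simp [pvGoSpec]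
  | cons c rest ih =>
    simp only [pvGoSpec]
    split_ifs <;> simp [ih]

theorem pvJoin_goSpec (cs : List Char) : ∀ pre, PySem.Chars.join ['.'] (pvGoSpec pre cs) = pre ++ cs := by
  induction cs with
  | nil => intro pre; simp [pvGoSpec, PySem.Chars.join_singleton]
  | cons c rest ih =>
    intro pre
    simp only [pvGoSpec]
    by_cases hc : c = '.'
    · subst hc
      rw [if_pos rfl]
      obtain ⟨q, Q, hq⟩ := List.exists_cons_of_ne_nil (pvGoSpec_ne_nil rest [])
      rw [hq, PySem.Chars.join_cons_cons, ← hq, ih []]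
      simp
    · rw [if_neg hc, ih (pre ++ [c])]
      simp

theorem pvGoSpec_no_dot (cs : List Char) (h : '.' ∉ cs) : ∀ pre, pvGoSpec pre cs = [pre ++ cs] := by
  induction cs with
  | nil => intro pre; simp [pvGoSpec]
  | cons c rest ih =>
    intro pre
    simp only [List.mem_cons, not_or] at h
    simp only [pvGoSpec, if_neg (fun (hc : c = '.') => h.1 hc.symm)]
    rw [ih h.2]
    simp

theorem pvGoSpec_first_dot (t : List Char) (ht : '.' ∉ t) (r : List Char) :
    ∀ pre, pvGoSpec pre (t ++ '.' :: r) = (pre ++ t) :: pvGoSpec [] r := by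
  induction t with
  | nil => intro pre; simp [pvGoSpec]
  | cons c rest ih =>
    intro pre
    simp only [List.mem_cons, not_or] at ht
    simp only [List.cons_append, pvGoSpec, if_neg (fun (hc : c = '.') => ht.1 hc.symm)]
    rw [ih ht.2]
    simp

theorem pvFindGo_no_dot (cs : List Char) (h : '.' ∉ cs) : ∀ k, PySem.Chars.find.go ['.'] cs k = -1 := by
  induction cs with
  | nil => intro k; simp [PySem.Chars.find.go]
  | cons c rest ih =>
    intro k
    simp only [List.mem_cons, not_or] at h
    rw [PySem.Chars.find.go]
    rw [if_neg (show ¬ List.isPrefixOf ['.'] (c :: rest) = true by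
      simp [List.isPrefixOf]; exact fun h' => h.1 h')]
    exact ih h.2 (k + 1)

theorem pvFindGo_first_dot (t : List Char) (ht : '.' ∉ t) (r : List Char) :
    ∀ k, PySem.Chars.find.go ['.'] (t ++ '.' :: r) k = k + t.length := by
  induction t with
  | nil =>
    intro k
    rw [List.nil_append, PySem.Chars.find.go, if_pos (by simp [List.isPrefixOf])]
    simp
  | cons c rest ih =>
    intro k
    simp only [List.mem_cons, not_or] at ht
    rw [List.cons_append, PySem.Chars.find.go]
    rw [if_neg (show ¬ List.isPrefixOf ['.'] (c :: (rest ++ '.' :: r)) = true by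
      simp [List.isPrefixOf]; exact fun h' => ht.1 h')]
    rw [ih ht.2 (k + 1)]
    simp
    omega

theorem pvFind_no_dot (cs : List Char) (h : '.' ∉ cs) : PySem.Chars.find cs ['.'] = -1 :=
  pvFindGo_no_dot cs h 0

theorem pvFind_first_dot (t : List Char) (ht : '.' ∉ t) (r : List Char) :
    PySem.Chars.find (t ++ '.' :: r) ['.'] = t.length := by
  have := pvFindGo_first_dot t ht r 0
  simpa [PySem.Chars.find] using this

theorem pvFirst_dot_decomp (cs : List Char) (h : '.' ∈ cs) :
    ∃ t r, cs = t ++ '.' :: r ∧ '.' ∉ t := by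
  induction cs with
  | nil => simp at h
  | cons c rest ih =>
    by_cases hc : c = '.'
    · exact ⟨[], rest, by simp [hc], by simp⟩
    · have hr : '.' ∈ rest := by
        rcases List.mem_cons.mp h with h' | h'
        · exact absurd h'.symm hc
        · exact h'
      obtain ⟨t, r, hcs, ht⟩ := ih hr
      exact ⟨c :: t, r, by simp [hcs], by
        simp only [List.mem_cons, not_or]
        exact ⟨fun h' => hc h'.symm, ht⟩⟩

-- The list of tails B adds for one name, in the order the peel loop adds them.
def pvTails (s : String) : List String :=
  if PySem.Str.find s "." = -1 then []
  else
    PySem.Str.slice s (some (PySem.Str.find s "." + 1)) none ::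
      pvTails (PySem.Str.slice s (some (PySem.Str.find s "." + 1)) none)
termination_by s.toList.length
decreasing_by
  rename_i h
  have h0 : (0:Int) ≤ PySem.Str.find s "." := by
    have := PySem.Chars.neg_one_le_find s.toList ".".toList
    simp only [PySem.Str.find] at h ⊢
    omega
  have hne : s.toList ≠ [] := by
    intro hnil
    apply h
    simp only [PySem.Str.find, hnil]
    rw [PySem.Chars.find_eq_neg_one_iff]
    intro hinf
    have := hinf.sublist.length_le
    simp at this
  have := PySem.Str.toList_slice s (some (PySem.Str.find s "." + 1)) none
  rw [this, PySem.Chars.slice_eq_listSlice, PySem.List.slice_from _ (by omega)]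
  have hpos : 0 < s.toList.length := List.length_pos_iff.mpr hne
  simp only [List.length_drop]
  omega

theorem pvPeelB_update (s : String) : ∀ u, pvPeelB u s = PySem.Set.update u (pvTails s) := by
  generalize hn : s.toList.length = n
  induction n using Nat.strong_induction_on generalizing s with
  | _ n ih =>
    intro u
    rw [pvPeelB.eq_def, pvTails.eq_def]
    by_cases h : PySem.Str.find s "." = -1
    · rw [if_pos h, if_pos h]; rfl
    · rw [if_neg h, if_neg h]
      have h0 : (0:Int) ≤ PySem.Str.find s "." := by
        have := PySem.Chars.neg_one_le_find s.toList ".".toList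
        simp only [PySem.Str.find] at h ⊢
        omega
      have hne : s.toList ≠ [] := by
        intro hnil
        apply h
        simp only [PySem.Str.find, hnil]
        rw [PySem.Chars.find_eq_neg_one_iff]
        intro hinf
        have := hinf.sublist.length_le
        simp at this
      have hlt : (PySem.Str.slice s (some (PySem.Str.find s "." + 1)) none).toList.length < n := by
        rw [PySem.Str.toList_slice, PySem.Chars.slice_eq_listSlice, PySem.List.slice_from _ (by omega)]
        have hpos : 0 < s.toList.length := List.length_pos_iff.mpr hne
        simp only [List.length_drop]
        omega
      rw [ih _ hlt _ rfl]
      rfl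

-- pvTails s equals the join-of-dropped-parts list A builds from s.split(".").
theorem pvTails_eq (n : Nat) : ∀ (s : String), s.toList.length = n →
    pvTails s =
      (List.range (((PySem.Str.split? s ".").getD []).length - 1)).map
        (fun k => PySem.Str.join "." (((PySem.Str.split? s ".").getD []).drop (k + 1))) := by
  induction n using Nat.strong_induction_on with
  | _ n ih =>
    intro s hn
    by_cases hdot : '.' ∈ s.toList
    · obtain ⟨t, r, hcs, ht⟩ := pvFirst_dot_decomp s.toList hdot
      have hfind : PySem.Str.find s "." = (t.length : Int) := by
        simp only [PySem.Str.find, hcs]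
        rw [show (".".toList : List Char) = ['.'] from rfl]
        exact pvFind_first_dot t ht r
      have hslice : (PySem.Str.slice s (some (PySem.Str.find s "." + 1)) none) = String.ofList r := by
        simp only [PySem.Str.slice, hfind]
        congr 1
        rw [PySem.Chars.slice_eq_listSlice]
        rw [show ((t.length : Int) + 1) = ((t.length + 1 : Nat) : Int) by push_cast; ring]
        rw [PySem.List.slice_from_natCast, hcs]
        simp [List.drop_append]
      have hrlen : r.length < n := by
        have : s.toList.length = t.length + 1 + r.length := by simp [hcs]; omega
        omega
      have hIH := ih r.length hrlen (String.ofList r) (by simp)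
      rw [pvTails.eq_def]
      rw [if_neg (by rw [hfind]; omega), hslice, hIH]
      -- compute the split of s and of the tail r
      have hG := pvGoSpec_first_dot t ht r []
      rw [pvSplit_eq s, pvSplit_eq (String.ofList r), String.toList_ofList, hcs, hG,
        List.nil_append]
      obtain ⟨q, Q, hq⟩ := List.exists_cons_of_ne_nil (pvGoSpec_ne_nil r [])
      have hlen1 : ((t :: pvGoSpec [] r).map String.ofList).length - 1 =
          ((pvGoSpec [] r).map String.ofList).length := by simp
      rw [hlen1]
      have hlen2 : ((pvGoSpec [] r).map String.ofList).length =
          (((pvGoSpec [] r).map String.ofList).length - 1) + 1 := by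
        rw [hq]; simp
      rw [hlen2, List.range_succ_eq_map, List.map_cons]
      congr 1
      · -- head: ".".join(parts[1:]) is the whole tail r
        simp only [List.map_cons, List.drop_succ_cons, List.drop_zero]
        simp only [PySem.Str.join]
        congr 1
        rw [show (".".toList : List Char) = ['.'] from rfl]
        rw [List.map_map, show String.toList ∘ String.ofList = id by
          funext l; simp, List.map_id]
        simp [pvJoin_goSpec r []]
      · -- tail: dropping one more part of s is dropping k+1 parts of r
        rw [List.map_map]
        apply List.map_congr_left
        intro k _
        simp [Nat.succ_eq_add_one]
    · have hfind : PySem.Str.find s "." = -1 := by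
        simp only [PySem.Str.find]
        rw [show (".".toList : List Char) = ['.'] from rfl]
        exact pvFind_no_dot s.toList hdot
      rw [pvTails.eq_def]
      rw [if_pos hfind, pvSplit_eq s, pvGoSpec_no_dot s.toList hdot []]
      simp

-- one subdomain step of A equals one peel of B, from any accumulator set
set_option maxHeartbeats 1000000 in
theorem pvInner_eq (s : String) (u : PySem.Set String) :
    (PySem.List.pyRange 0 ((((PySem.Str.split? s ".").getD []).length : Int) - 1) 1).foldl
      (fun uniqueSubs i =>
        PySem.Set.add uniqueSubs
          (PySem.Str.join "."
            (PySem.List.slice ((PySem.Str.split? s ".").getD []) (some (i + 1)) none)))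
      u
    = pvPeelB u s := by
  rw [pvPeelB_update, pvTails_eq s.toList.length s rfl, PySem.List.pyRange_one]
  simp only [PySem.Set.update]
  rw [List.foldl_map, List.foldl_map]
  rw [show ((((PySem.Str.split? s ".").getD []).length : Int) - 1 - 0).toNat =
    ((PySem.Str.split? s ".").getD []).length - 1 by omega]
  apply PySem.List.foldl_congr_mem
  intro acc k _
  congr 1
  rw [show ((0 : Int) + (k : Int) + 1) = ((k + 1 : Nat) : Int) by push_cast; ring]
  rw [PySem.List.slice_from_natCast]

theorem pvFold_eq : ∀ (subs : List (List String)) (u : PySem.Set String),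
    List.foldl (fun uniqueSubs subdomain =>
      (PySem.List.pyRange 0 ((((PySem.Str.split? ((PySem.List.pyGet? subdomain 0).getD "") ".").getD []).length : Int) - 1) 1).foldl
        (fun uniqueSubs i =>
          PySem.Set.add uniqueSubs
            (PySem.Str.join "."
              (PySem.List.slice ((PySem.Str.split? ((PySem.List.pyGet? subdomain 0).getD "") ".").getD [])
                (some (i + 1)) none)))
        uniqueSubs) u subs
    = List.foldl (fun uniqueSubs subdomain =>
        pvPeelB uniqueSubs ((PySem.List.pyGet? subdomain 0).getD "")) u subs := by
  intro subs
  induction subs with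
  | nil => intro u; rfl
  | cons a tl ih =>
    intro u
    simp only [List.foldl_cons]
    rw [pvInner_eq, ih]

-- ===== VERDICT (by name: the statement is the Claim_ definition above) =====
theorem uniqueSubdomainLevels_spec : Claim_equal_uniqueSubdomainLevels := by
  intro subdomains _ _
  show uniqueSubdomainLevels subdomains = uniqueSubdomainLevels_alt subdomains
  unfold uniqueSubdomainLevels uniqueSubdomainLevels_alt
  exact pvFold_eq subdomains _
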